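-- pv_equiv track=rewrite | github.com/santa2me/Coding_problems | Programmers_Lv1/공원.py | solution
-- ===== SOURCE A (Python) =====
-- def solution(mats, park):
--     # Sort mats in descending order
--     mats.sort(reverse=True)
--
--     rows, cols = len(park), len(park[0])
--
--     # Function to check if a mat of size k x k can fit at (r, c)
--     def can_place(k, r, c):
--         if r + k > rows or c + k > cols:
--             return False
--         for i in range(r, r + k):
--             for j in range(c, c + k):
--                 if park[i][j] != "-1":
--                     return False
--         return True
--
--     # Iterate over each mat size
--     for mat in mats:
--         for r in range(rows):
--             for c in range(cols):
--                 if can_place(mat, r, c):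
--                     return mat
--
--     # If no mat can fit
--     return -1
-- ===== SOURCE B (Python) =====
-- def solution(mats, park):
--     rows, cols = len(park), len(park[0])
--     if cols == 0:
--         # a park with no cells fits nothing
--         return -1
--
--     def fits(k, r, c):
--         want = ["-1"] * k
--         return (r + k <= rows and c + k <= cols
--                 and all(park[i][c:c + k] == want for i in range(r, r + k)))
--
--     # one pass over the park grows the side of the largest fully available square
--     side = 0
--     for r in range(rows):
--         for c in range(cols):
--             while fits(side + 1, r, c):
--                 side += 1
--
--     return max((m for m in mats if m <= side), default=-1)
-- ===== Notes on version B (the rewrite author's own statement) =====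
-- stated objective: faster
-- what changed: B computes the side of the largest fully available square once with a single monotone-growing scan using slice comparisons (after an early return for a zero-width park), then picks the largest mat not exceeding it, instead of A's rescanning the whole park with quadratic block checks for every mat; B does not mutate (sort) mats. Pre_ excludes the empty park (A raises IndexError at park[0]) and ragged parks combined with a positive mat size, where A raises IndexError mid-scan unless a fit happens to come first in scan order.
-- outside the precondition, e.g. on solution([2], [['-1', '-1'], ['-1', '-1'], ['-1']]): A returns 2, B returns 2
import Mathlib
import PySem

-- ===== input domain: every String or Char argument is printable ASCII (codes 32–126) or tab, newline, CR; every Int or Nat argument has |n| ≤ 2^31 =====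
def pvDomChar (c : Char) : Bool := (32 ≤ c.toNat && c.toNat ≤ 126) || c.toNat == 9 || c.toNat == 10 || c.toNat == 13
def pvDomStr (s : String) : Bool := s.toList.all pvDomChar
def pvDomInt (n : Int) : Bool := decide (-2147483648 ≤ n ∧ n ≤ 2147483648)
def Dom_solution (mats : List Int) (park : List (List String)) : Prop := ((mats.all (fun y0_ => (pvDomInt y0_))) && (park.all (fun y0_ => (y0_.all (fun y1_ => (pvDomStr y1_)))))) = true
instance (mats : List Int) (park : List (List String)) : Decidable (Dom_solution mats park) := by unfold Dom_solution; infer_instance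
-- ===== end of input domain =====

-- B computes the side of the largest all-"-1" square once with a monotone-growing scan of
-- slice comparisons (after an early return for a zero-width park), then picks the largest
-- mat not exceeding it, instead of A's per-mat rescans; B does not mutate (sort) the `mats`
-- argument as A does — the equivalence is about the RETURN value only.


-- ===== PORT A =====
-- park[i][j]; total helper, exact while both indices are in range (Pre_solution keeps them so)
def pvCell (park : List (List String)) (i j : Nat) : String := (park.getD i []).getD j ""

-- can_place(k, r, c); range(r, r+k) is ported as List.range' r k.toNat — exact, since it is
-- empty for k ≤ 0 and has the elements r, …, r+k-1 for k > 0
def pvCanPlace (park : List (List String)) (rows cols : Nat) (k : Int) (r c : Nat) : Bool :=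
  if (rows : Int) < (r : Int) + k || (cols : Int) < (c : Int) + k then false
  else (List.range' r k.toNat).all (fun i =>
         (List.range' c k.toNat).all (fun j => pvCell park i j == "-1"))

def solution (mats : List Int) (park : List (List String)) : Int :=
  let matsS := PySem.List.sorted mats (fun m => m) true   -- mats.sort(reverse=True)
  let rows := park.length
  let cols := (park.headD []).length                      -- len(park[0]); Pre_ gives park ≠ []
  match matsS.find? (fun m =>
          (List.range rows).any (fun r =>
            (List.range cols).any (fun c => pvCanPlace park rows cols m r c))) with
  | some m => m
  | none => -1

-- ===== PORT B =====
-- fits(k, r, c) of Source B (k is a Nat there: it is only called with side+1); park[i][c:c+k]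
-- is ported with PySem.List.slice (exact), ["-1"] * k with List.replicate; park[i] is read
-- with i < r + k ≤ rows = len(park), so getD is exact
def pvFits (park : List (List String)) (rows cols k r c : Nat) : Bool :=
  decide (r + k ≤ rows) && decide (c + k ≤ cols) &&
  (List.range' r k).all (fun i =>
    PySem.List.slice (park.getD i []) (some (c : Int)) (some ((c : Int) + (k : Int)))
      == List.replicate k "-1")

-- the `while fits(side+1, r, c): side += 1` loop; fuel rows+1 never runs out, since
-- fits (s+1) r c = true forces s+1 ≤ rows
def pvGrow (park : List (List String)) (rows cols : Nat) : Nat → Nat → Nat → Nat → Nat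
  | 0, s, _, _ => s
  | fuel+1, s, r, c =>
      if pvFits park rows cols (s+1) r c then pvGrow park rows cols fuel (s+1) r c else s

def solution_alt (mats : List Int) (park : List (List String)) : Int :=
  let rows := park.length
  let cols := (park.headD []).length
  if cols = 0 then -1    -- a park with no cells fits nothing
  else
    let side := (List.range rows).foldl (fun s r =>
                   (List.range cols).foldl (fun s c =>
                     pvGrow park rows cols (rows+1) s r c) s) 0
    PySem.List.maxD (mats.filter (fun m => decide (m ≤ (side : Int)))) (fun m => m) (-1)

-- ===== PRECONDITION & SPEC =====
-- Pre_ excludes the empty park (A raises IndexError at park[0]) and ragged parks (a row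
-- shorter than the first) combined with a positive mat size: there A's scan raises IndexError
-- mid-scan unless a fit happens to come first in scan order, an accident of its traversal.
def Pre_solution (mats : List Int) (park : List (List String)) : Prop :=
  park ≠ [] ∧
    ((∀ row ∈ park, (park.headD []).length ≤ row.length) ∨ ∀ m ∈ mats, m < 1)
instance (mats : List Int) (park : List (List String)) : Decidable (Pre_solution mats park) := by
  unfold Pre_solution; infer_instance

def pvWitness_solution : List Int × List (List String) := ([1], [["-1"]])

def Spec_solution (mats : List Int) (park : List (List String)) (out : Int) : Prop :=
  out = solution_alt mats park
instance (mats : List Int) (park : List (List String)) (out : Int) :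
    Decidable (Spec_solution mats park out) := by unfold Spec_solution; infer_instance

-- ===== CLAIM (what is proved, stated in full; the proofs are below) =====
def Claim_equal_solution : Prop := ∀ (mats : List Int) (park : List (List String)),
  Dom_solution mats park → Pre_solution mats park → Spec_solution mats park (solution mats park)

-- ===== LEMMAS AND PROOFS =====

-- index form of fits (the form A's can_place takes); used only by the proofs
def pvFitsIdx (park : List (List String)) (rows cols k r c : Nat) : Bool :=
  decide (r + k ≤ rows) && decide (c + k ≤ cols) &&
  (List.range' r k).all (fun i => (List.range' c k).all (fun j => pvCell park i j == "-1"))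

-- a row slice equals the all-"-1" block iff every cell of the block reads "-1"
lemma rowFit_iff (row : List String) (c k : Nat) :
    (row.drop c).take k = List.replicate k "-1" ↔
      ∀ j ∈ List.range' c k, row.getD j "" = "-1" := by
  constructor
  · intro h j hj
    rw [List.mem_range'_1] at hj
    have h2 := congrArg (fun l => l[j - c]?) h
    simp only [List.getElem?_take, List.getElem?_drop, List.getElem?_replicate] at h2
    rw [if_pos (show j - c < k by omega), if_pos (show j - c < k by omega)] at h2
    have hcj : c + (j - c) = j := by omega
    rw [hcj] at h2
    rw [List.getD_eq_getElem?_getD, h2]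
    rfl
  · intro h
    cases k with
    | zero => simp
    | succ n =>
      have hck : c + (n + 1) ≤ row.length := by
        by_contra hlt
        push_neg at hlt
        rcases Nat.lt_or_ge row.length (c + 1) with hc | hc
        · have hx := h c (by rw [List.mem_range'_1]; omega)
          rw [List.getD_eq_default] at hx
          · exact absurd hx (by decide)
          · omega
        · have hx := h row.length (by rw [List.mem_range'_1]; omega)
          rw [List.getD_eq_default] at hx
          · exact absurd hx (by decide)
          · omega
      apply List.ext_getElem
      · rw [List.length_take, List.length_drop, List.length_replicate]; omega
      · intro i h1 h2
        simp only [List.getElem_take, List.getElem_drop, List.getElem_replicate]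
        have hi : i < n + 1 := by
          rw [List.length_take, List.length_drop] at h1; omega
        have hx := h (c + i) (by rw [List.mem_range'_1]; omega)
        rw [List.getD_eq_getElem _ _ (by omega)] at hx
        exact hx

-- the slice form of fits equals its index form
lemma pvFits_eq_idx (park : List (List String)) (rows cols k r c : Nat) :
    pvFits park rows cols k r c = pvFitsIdx park rows cols k r c := by
  rw [Bool.eq_iff_iff]
  simp only [pvFits, pvFitsIdx, pvCell, Bool.and_eq_true, decide_eq_true_eq,
    List.all_eq_true, beq_iff_eq, PySem.List.slice_natCast_add]
  constructor
  · rintro ⟨hb, hall⟩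
    exact ⟨hb, fun i hi j hj => (rowFit_iff _ c k).mp (hall i hi) j hj⟩
  · rintro ⟨hb, hall⟩
    exact ⟨hb, fun i hi => (rowFit_iff _ c k).mpr (hall i hi)⟩

-- fits is monotone (downwards) in the square side, at a fixed top-left corner
lemma pvFitsIdx_mono {park : List (List String)} {rows cols j k r c : Nat} (hjk : j ≤ k)
    (h : pvFitsIdx park rows cols k r c = true) : pvFitsIdx park rows cols j r c = true := by
  simp only [pvFitsIdx, Bool.and_eq_true, decide_eq_true_eq, List.all_eq_true] at h ⊢
  obtain ⟨⟨h1, h2⟩, h3⟩ := h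
  refine ⟨⟨by omega, by omega⟩, ?_⟩
  intro i hi
  have hi' : i ∈ List.range' r k := by
    rw [List.mem_range'_1] at hi ⊢; omega
  intro jj hjj
  have hjj' : jj ∈ List.range' c k := by
    rw [List.mem_range'_1] at hjj ⊢; omega
  exact h3 i hi' jj hjj'

lemma pvFitsIdx_le_rows {park : List (List String)} {rows cols k r c : Nat}
    (h : pvFitsIdx park rows cols k r c = true) : r + k ≤ rows ∧ c + k ≤ cols := by
  simp only [pvFitsIdx, Bool.and_eq_true, decide_eq_true_eq] at h
  exact ⟨h.1.1, h.1.2⟩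

lemma pvFits_mono {park : List (List String)} {rows cols j k r c : Nat} (hjk : j ≤ k)
    (h : pvFits park rows cols k r c = true) : pvFits park rows cols j r c = true := by
  rw [pvFits_eq_idx] at h ⊢
  exact pvFitsIdx_mono hjk h

lemma pvFits_le_rows {park : List (List String)} {rows cols k r c : Nat}
    (h : pvFits park rows cols k r c = true) : r + k ≤ rows ∧ c + k ≤ cols := by
  rw [pvFits_eq_idx] at h
  exact pvFitsIdx_le_rows h

lemma pvGrow_le (park : List (List String)) (rows cols : Nat) :
    ∀ fuel s r c, s ≤ pvGrow park rows cols fuel s r c := by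
  intro fuel
  induction fuel with
  | zero => intro s r c; simp [pvGrow]
  | succ n ih =>
    intro s r c
    simp only [pvGrow]
    split
    · exact le_trans (Nat.le_succ s) (ih (s+1) r c)
    · exact le_rfl

-- the loop dominates every fitting side at its own cell (fuel rows+1 is always enough)
lemma pvGrow_fits (park : List (List String)) (rows cols : Nat) :
    ∀ fuel s r c k, rows + 1 ≤ fuel + s → pvFits park rows cols k r c = true →
      k ≤ pvGrow park rows cols fuel s r c := by
  intro fuel
  induction fuel with
  | zero =>
    intro s r c k hf hk
    have := (pvFits_le_rows hk).1
    simp only [pvGrow]; omega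
  | succ n ih =>
    intro s r c k hf hk
    simp only [pvGrow]
    split
    next hsp => exact ih (s+1) r c k (by omega) hk
    next hsp =>
      by_contra hlt
      push_neg at hlt
      exact absurd (pvFits_mono (show s + 1 ≤ k by omega) hk) hsp

-- the loop's result is its start or a genuinely fitting side
lemma pvGrow_inv (park : List (List String)) (rows cols : Nat) :
    ∀ fuel s r c, pvGrow park rows cols fuel s r c = s ∨
      pvFits park rows cols (pvGrow park rows cols fuel s r c) r c = true := by
  intro fuel
  induction fuel with
  | zero => intro s r c; left; simp [pvGrow]
  | succ n ih =>
    intro s r c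
    simp only [pvGrow]
    split
    next hsp =>
      rcases ih (s+1) r c with h | h
      · right; rw [h]; exact hsp
      · right; exact h
    next hsp => left; rfl

-- abbreviation for the side fold of solution_alt
def pvMaxsq (park : List (List String)) (rows cols : Nat) : Nat :=
  (List.range rows).foldl (fun s r =>
    (List.range cols).foldl (fun s c => pvGrow park rows cols (rows+1) s r c) s) 0

lemma foldl_inner_le (park : List (List String)) (rows cols r : Nat) :
    ∀ (cs : List Nat) (s : Nat),
      s ≤ cs.foldl (fun s c => pvGrow park rows cols (rows+1) s r c) s := by
  intro cs
  induction cs with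
  | nil => intro s; simp
  | cons c t ih =>
    intro s
    simp only [List.foldl_cons]
    exact le_trans (pvGrow_le park rows cols (rows+1) s r c) (ih _)

lemma foldl_outer_le (park : List (List String)) (rows cols : Nat) :
    ∀ (rs : List Nat) (s : Nat),
      s ≤ rs.foldl (fun s r =>
        (List.range cols).foldl (fun s c => pvGrow park rows cols (rows+1) s r c) s) s := by
  intro rs
  induction rs with
  | nil => intro s; simp
  | cons r t ih =>
    intro s
    simp only [List.foldl_cons]
    exact le_trans (foldl_inner_le park rows cols r (List.range cols) s) (ih _)

lemma foldl_inner_fits (park : List (List String)) (rows cols r : Nat) :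
    ∀ (cs : List Nat) (s c k : Nat), c ∈ cs → pvFits park rows cols k r c = true →
      k ≤ cs.foldl (fun s c => pvGrow park rows cols (rows+1) s r c) s := by
  intro cs
  induction cs with
  | nil => intro s c k hc; simp at hc
  | cons c0 t ih =>
    intro s c k hc hk
    simp only [List.foldl_cons]
    rcases List.mem_cons.mp hc with rfl | hct
    · exact le_trans (pvGrow_fits park rows cols (rows+1) s r c k (by omega) hk)
        (foldl_inner_le park rows cols r t _)
    · exact ih _ c k hct hk

lemma foldl_outer_fits (park : List (List String)) (rows cols : Nat) :
    ∀ (rs : List Nat) (s r c k : Nat), r ∈ rs → c ∈ List.range cols →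
      pvFits park rows cols k r c = true →
      k ≤ rs.foldl (fun s r =>
        (List.range cols).foldl (fun s c => pvGrow park rows cols (rows+1) s r c) s) s := by
  intro rs
  induction rs with
  | nil => intro s r c k hr; simp at hr
  | cons r0 t ih =>
    intro s r c k hr hc hk
    simp only [List.foldl_cons]
    rcases List.mem_cons.mp hr with rfl | hrt
    · exact le_trans (foldl_inner_fits park rows cols r (List.range cols) s c k hc hk)
        (foldl_outer_le park rows cols t _)
    · exact ih _ r c k hrt hc hk

-- invariant: the running maximum is 0 or an actually fitting side somewhere
def pvGood (park : List (List String)) (rows cols s : Nat) : Prop :=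
  s = 0 ∨ ∃ r c, pvFits park rows cols s r c = true

lemma pvGood_grow (park : List (List String)) (rows cols : Nat) {s : Nat}
    (h : pvGood park rows cols s) (fuel r c : Nat) :
    pvGood park rows cols (pvGrow park rows cols fuel s r c) := by
  rcases pvGrow_inv park rows cols fuel s r c with he | hf
  · rw [he]; exact h
  · exact Or.inr ⟨r, c, hf⟩

lemma pvGood_foldl_inner (park : List (List String)) (rows cols r : Nat) :
    ∀ (cs : List Nat) (s : Nat), pvGood park rows cols s →
      pvGood park rows cols (cs.foldl (fun s c => pvGrow park rows cols (rows+1) s r c) s) := by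
  intro cs
  induction cs with
  | nil => intro s h; simpa
  | cons c t ih =>
    intro s h
    simp only [List.foldl_cons]
    exact ih _ (pvGood_grow park rows cols h (rows+1) r c)

lemma pvGood_foldl_outer (park : List (List String)) (rows cols : Nat) :
    ∀ (rs : List Nat) (s : Nat), pvGood park rows cols s →
      pvGood park rows cols (rs.foldl (fun s r =>
        (List.range cols).foldl (fun s c => pvGrow park rows cols (rows+1) s r c) s) s) := by
  intro rs
  induction rs with
  | nil => intro s h; simpa
  | cons r t ih =>
    intro s h
    simp only [List.foldl_cons]
    exact ih _ (pvGood_foldl_inner park rows cols r (List.range cols) s h)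

-- characterisation of the computed side: for k ≥ 1, some k×k block fits iff k ≤ side
lemma pvMaxsq_spec (park : List (List String)) (rows cols k : Nat) (hk : 1 ≤ k) :
    (∃ r c, pvFits park rows cols k r c = true) ↔ k ≤ pvMaxsq park rows cols := by
  constructor
  · rintro ⟨r, c, hf⟩
    have hb := pvFits_le_rows hf
    have hr : r ∈ List.range rows := by rw [List.mem_range]; omega
    have hc : c ∈ List.range cols := by rw [List.mem_range]; omega
    exact foldl_outer_fits park rows cols (List.range rows) 0 r c k hr hc hf
  · intro hle
    have hg : pvGood park rows cols (pvMaxsq park rows cols) :=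
      pvGood_foldl_outer park rows cols (List.range rows) 0 (Or.inl rfl)
    rcases hg with h0 | ⟨r, c, hf⟩
    · omega
    · exact ⟨r, c, pvFits_mono hle hf⟩

-- can_place agrees with fits for positive sides …
lemma pvCanPlace_pos (park : List (List String)) (rows cols : Nat) {m : Int} (hm : 1 ≤ m)
    (r c : Nat) : pvCanPlace park rows cols m r c = pvFits park rows cols m.toNat r c := by
  rw [pvFits_eq_idx, Bool.eq_iff_iff]
  simp only [pvCanPlace, pvFitsIdx, Bool.and_eq_true, decide_eq_true_eq]
  split
  next hb =>
    rw [Bool.or_eq_true, decide_eq_true_eq, decide_eq_true_eq] at hb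
    constructor
    · intro h; simp at h
    · rintro ⟨⟨h1, h2⟩, -⟩; omega
  next hb =>
    rw [Bool.or_eq_true, decide_eq_true_eq, decide_eq_true_eq] at hb
    push_neg at hb
    simp only [List.all_eq_true]
    constructor
    · intro h; exact ⟨⟨by omega, by omega⟩, h⟩
    · rintro ⟨-, h⟩; exact h

-- … and is "in bounds" for non-positive sides
lemma pvCanPlace_nonpos (park : List (List String)) (rows cols : Nat) {m : Int} (hm : m ≤ 0)
    {r c : Nat} (hr : r < rows) (hc : c < cols) : pvCanPlace park rows cols m r c = true := by
  simp only [pvCanPlace]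
  have hb : ¬ ((rows : Int) < (r : Int) + m ∨ (cols : Int) < (c : Int) + m) := by omega
  have hk : m.toNat = 0 := by omega
  split
  next h =>
    rw [Bool.or_eq_true, decide_eq_true_eq, decide_eq_true_eq] at h
    exact absurd h hb
  next h => simp [hk]

-- A's search predicate equals B's filter predicate under Pre_
lemma pred_eq (park : List (List String)) (rows cols : Nat) (hrows : 1 ≤ rows)
    (hcols : 1 ≤ cols) (m : Int) :
    ((List.range rows).any (fun r =>
      (List.range cols).any (fun c => pvCanPlace park rows cols m r c)))
    = decide (m ≤ (pvMaxsq park rows cols : Int)) := by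
  rw [Bool.eq_iff_iff]
  simp only [List.any_eq_true, List.mem_range, decide_eq_true_eq]
  by_cases hm : 1 ≤ m
  · constructor
    · rintro ⟨r, hr, c, hc, hcp⟩
      rw [pvCanPlace_pos park rows cols hm] at hcp
      have : m.toNat ≤ pvMaxsq park rows cols :=
        (pvMaxsq_spec park rows cols m.toNat (by omega)).mp ⟨r, c, hcp⟩
      omega
    · intro h
      obtain ⟨r, c, hf⟩ :=
        (pvMaxsq_spec park rows cols m.toNat (by omega)).mpr (by omega)
      have hb := pvFits_le_rows hf
      refine ⟨r, by omega, c, by omega, ?_⟩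
      rw [pvCanPlace_pos park rows cols hm]; exact hf
  · push_neg at hm
    have hm' : m ≤ 0 := by omega
    constructor
    · intro _; omega
    · intro _
      exact ⟨0, by omega, 0, by omega, pvCanPlace_nonpos park rows cols hm' (by omega) (by omega)⟩

-- in a descending-sorted list, the first element satisfying p dominates every satisfier
lemma find?_pairwise_max {p : Int → Bool} :
    ∀ {l : List Int}, l.Pairwise (fun a b => b ≤ a) → ∀ {x : Int}, l.find? p = some x →
      ∀ y ∈ l, p y = true → y ≤ x := by
  intro l
  induction l with
  | nil => intro _ x h; simp at h
  | cons a t ih =>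
    intro hp x hf y hy hpy
    rw [List.pairwise_cons] at hp
    rw [List.find?_cons] at hf
    split at hf
    · obtain rfl : a = x := by injection hf
      rcases List.mem_cons.mp hy with rfl | hyt
      · exact le_rfl
      · exact hp.1 y hyt
    · rcases List.mem_cons.mp hy with rfl | hyt
      · simp_all
      · exact ih hp.2 hf y hyt hpy

-- first-match over the descending sort equals the maximum of the filtered list
lemma find?_sorted_eq_maxD (mats : List Int) (p : Int → Bool) :
    (match (PySem.List.sorted mats (fun m => m) true).find? p with
      | some m => m
      | none => (-1 : Int))
    = PySem.List.maxD (mats.filter p) (fun m => m) (-1) := by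
  have hperm := PySem.List.sorted_perm mats (fun m => m) true
  have hpair := PySem.List.sorted_pairwise_rev mats (fun m => m)
  cases hfind : (PySem.List.sorted mats (fun m => m) true).find? p with
  | none =>
    rw [List.find?_eq_none] at hfind
    have hfe : mats.filter p = [] := by
      rw [List.filter_eq_nil_iff]
      intro y hy
      exact hfind y (hperm.mem_iff.mpr hy)
    rw [hfe]
    rfl
  | some x =>
    have hpx : p x = true := List.find?_some hfind
    have hxm : x ∈ mats := hperm.mem_iff.mp (List.mem_of_find?_eq_some hfind)
    have hxf : x ∈ mats.filter p := List.mem_filter.mpr ⟨hxm, hpx⟩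
    have hmaxx : ∀ y ∈ mats.filter p, y ≤ x := by
      intro y hy
      obtain ⟨hym, hpy⟩ := List.mem_filter.mp hy
      exact find?_pairwise_max hpair hfind y (hperm.mem_iff.mpr hym) hpy
    simp only [PySem.List.maxD]
    cases hmx : PySem.List.max? (mats.filter p) (fun m => m) with
    | none =>
      rw [PySem.List.max?_eq_none_iff] at hmx
      rw [hmx] at hxf
      simp at hxf
    | some z =>
      have hz1 : z ≤ x := hmaxx z (PySem.List.max?_mem hmx)
      have hz2 : x ≤ z := PySem.List.max?_isMax hmx x hxf
      simp only [Option.getD_some]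
      omega

-- ===== VERDICT (by name: the statement is the Claim_ definition above) =====
theorem solution_spec : Claim_equal_solution := by
  intro mats park _hdom hpre
  have hrows : 1 ≤ park.length := List.length_pos_iff.mpr hpre.1
  unfold Spec_solution solution solution_alt
  by_cases hcols : (park.headD []).length = 0
  · have hf : (PySem.List.sorted mats (fun m => m) true).find? (fun m =>
        (List.range park.length).any (fun r =>
          (List.range (park.headD []).length).any (fun c =>
            pvCanPlace park park.length (park.headD []).length m r c))) = none :=
      List.find?_eq_none.mpr (fun x _ => by
        rw [List.headD_eq_head?_getD] at hcols
        simp [hcols])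
    show (match (PySem.List.sorted mats (fun m => m) true).find? (fun m =>
            (List.range park.length).any (fun r =>
              (List.range (park.headD []).length).any (fun c =>
                pvCanPlace park park.length (park.headD []).length m r c))) with
          | some m => m
          | none => (-1 : Int))
        = if (park.headD []).length = 0 then (-1 : Int) else _
    rw [hf, if_pos hcols]
  · have hcols0 : 1 ≤ (park.headD []).length := by omega
    show (match (PySem.List.sorted mats (fun m => m) true).find? (fun m =>
            (List.range park.length).any (fun r =>
              (List.range (park.headD []).length).any (fun c =>
                pvCanPlace park park.length (park.headD []).length m r c))) with
          | some m => m
          | none => (-1 : Int))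
        = if (park.headD []).length = 0 then (-1 : Int) else
            PySem.List.maxD
              (mats.filter (fun m =>
                decide (m ≤ (pvMaxsq park park.length (park.headD []).length : Int))))
              (fun m => m) (-1)
    rw [if_neg hcols]
    have hfun : (fun m => (List.range park.length).any (fun r =>
          (List.range (park.headD []).length).any (fun c =>
            pvCanPlace park park.length (park.headD []).length m r c)))
        = (fun m => decide (m ≤ (pvMaxsq park park.length (park.headD []).length : Int))) :=
      funext (fun m => pred_eq park park.length (park.headD []).length hrows hcols0 m)
    rw [hfun]
    exact find?_sorted_eq_maxD mats _
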